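-- pv_equiv track=rewrite | github.com/ElizabethPopov/python-course-assignments | day07/extended_dna_sequencing_with_functions.py | return_sequence_from_input
-- ===== SOURCE A (Python) =====
-- def return_sequence_from_input(seq_input):
--     '''Returns a sequence from the input string, filtering out non-DNA characters.'''
--     seq = ''
--     seq_lst = []
--     for letter in seq_input.upper():
--         if letter in 'ATCG':
--             seq += letter
--         else:
--             if seq:
--                 seq_lst.append(seq)
--                 seq = ''
--     if seq:
--         seq_lst.append(seq)
--
--     return seq_lst
-- ===== SOURCE B (Python) =====
-- import re
--
-- def return_sequence_from_input(seq_input):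
--     '''Returns a sequence from the input string, filtering out non-DNA characters.'''
--     return re.findall(r'[ATCG]+', seq_input.upper())
-- ===== Notes on version B (the rewrite author's own statement) =====
-- stated objective: idiomatic
-- what changed: The stateful accumulate-and-flush loop is replaced by a single regex scan (re.findall of maximal [ATCG]+ runs on the uppercased string), with no accumulator or flush logic.
import Mathlib
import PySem

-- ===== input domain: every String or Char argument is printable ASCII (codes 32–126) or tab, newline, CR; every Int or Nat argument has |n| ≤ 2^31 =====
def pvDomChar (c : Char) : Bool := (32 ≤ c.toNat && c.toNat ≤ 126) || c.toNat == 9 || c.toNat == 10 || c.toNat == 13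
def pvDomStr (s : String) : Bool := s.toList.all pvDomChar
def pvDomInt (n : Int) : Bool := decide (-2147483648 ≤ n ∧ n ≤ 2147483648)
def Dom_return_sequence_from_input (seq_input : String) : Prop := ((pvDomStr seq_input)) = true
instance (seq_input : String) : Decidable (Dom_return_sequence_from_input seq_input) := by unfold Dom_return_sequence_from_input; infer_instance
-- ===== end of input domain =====

-- B replaces A's accumulate-and-flush loop by a direct scan for maximal runs of ATCG characters (re.findall in Python).

-- ===== PORT A =====
-- letter in 'ATCG'
def pvIsDNA (c : Char) : Bool := c = 'A' || c = 'T' || c = 'C' || c = 'G'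

-- loop body: state (seq, seq_lst), strings as List Char
-- final 'if seq: seq_lst.append(seq)'
def pvFlushA (st : List Char × List (List Char)) : List (List Char) :=
  if st.1 ≠ [] then st.2 ++ [st.1] else st.2

def pvAStep (st : List Char × List (List Char)) (c : Char) : List Char × List (List Char) :=
  if pvIsDNA c then (st.1 ++ [c], st.2)
  else if st.1 ≠ [] then ([], st.2 ++ [st.1]) else st

def return_sequence_from_input (seq_input : String) : List String :=
  (pvFlushA ((PySem.Str.upper seq_input).toList.foldl pvAStep ([], []))).map String.ofList

-- ===== PORT B =====
-- re.findall(r'[ATCG]+', ...): skip non-DNA chars, take each maximal DNA run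
def pvRuns : List Char → List (List Char)
  | [] => []
  | c :: cs =>
    if pvIsDNA c then (c :: cs.takeWhile pvIsDNA) :: pvRuns (cs.dropWhile pvIsDNA)
    else pvRuns cs
termination_by cs => cs.length
decreasing_by
  · exact Nat.lt_succ_of_le (List.length_dropWhile_le _ _)
  · simp

def return_sequence_from_input_alt (seq_input : String) : List String :=
  (pvRuns (PySem.Str.upper seq_input).toList).map String.ofList

-- ===== PRECONDITION & SPEC =====
def Spec_return_sequence_from_input (seq_input : String) (out : List String) : Prop := out = return_sequence_from_input_alt seq_input
instance (seq_input : String) (out : List String) : Decidable (Spec_return_sequence_from_input seq_input out) := by unfold Spec_return_sequence_from_input; infer_instance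

-- ===== CLAIM (what is proved, stated in full; the proofs are below) =====
def Claim_equal_return_sequence_from_input : Prop := ∀ (seq_input : String), Dom_return_sequence_from_input seq_input → Spec_return_sequence_from_input seq_input (return_sequence_from_input seq_input)

-- ===== LEMMAS AND PROOFS =====

-- pvRuns with a pending (already accumulated) run `seq`
def pvRunsP (seq : List Char) : List Char → List (List Char)
  | [] => if seq = [] then [] else [seq]
  | c :: cs =>
    if pvIsDNA c then pvRunsP (seq ++ [c]) cs
    else if seq = [] then pvRunsP [] cs else seq :: pvRunsP [] cs

theorem pvRunsP_spec (cs : List Char) :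
    pvRunsP [] cs = pvRuns cs ∧
    ∀ seq : List Char, seq ≠ [] →
      pvRunsP seq cs = (seq ++ cs.takeWhile pvIsDNA) :: pvRuns (cs.dropWhile pvIsDNA) := by
  induction cs with
  | nil => exact ⟨by simp [pvRunsP, pvRuns], fun seq h => by simp [pvRunsP, pvRuns, h]⟩
  | cons c cs ih =>
    constructor
    · by_cases h : pvIsDNA c = true
      · rw [pvRunsP, if_pos h]
        rw [show ([] : List Char) ++ [c] = [c] from rfl, ih.2 [c] (by simp)]
        simp [pvRuns, h]
      · simp only [pvRunsP, h, Bool.false_eq_true, if_false]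
        rw [ih.1]
        simp [pvRuns, h]
    · intro seq hseq
      by_cases h : pvIsDNA c = true
      · rw [pvRunsP, if_pos h, ih.2 (seq ++ [c]) (by simp)]
        simp [List.takeWhile, List.dropWhile, h]
      · rw [pvRunsP]
        simp only [h, Bool.false_eq_true, if_false, if_neg hseq, ih.1]
        simp [pvRuns, h]

theorem pvFold_flush (cs : List Char) : ∀ (seq : List Char) (lst : List (List Char)),
    pvFlushA (cs.foldl pvAStep (seq, lst)) = lst ++ pvRunsP seq cs := by
  induction cs with
  | nil =>
    intro seq lst
    by_cases h : seq = [] <;> simp [pvFlushA, pvRunsP, h]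
  | cons c cs ih =>
    intro seq lst
    by_cases h : pvIsDNA c = true
    · simp only [List.foldl_cons, pvAStep, if_pos h]
      rw [ih (seq ++ [c]) lst, pvRunsP, if_pos h]
    · by_cases hs : seq = []
      · simp only [List.foldl_cons, pvAStep, h, Bool.false_eq_true, if_false, hs,
          ne_eq, not_true_eq_false, if_neg, not_false_eq_true]
        rw [ih [] lst, pvRunsP]
        simp [h]
      · simp only [List.foldl_cons, pvAStep, h, Bool.false_eq_true, if_false,
          ne_eq, hs, not_false_eq_true, if_pos]
        rw [ih [] (lst ++ [seq]), pvRunsP]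
        simp [h, hs]

-- ===== VERDICT (by name: the statement is the Claim_ definition above) =====
theorem return_sequence_from_input_spec : Claim_equal_return_sequence_from_input := by
  intro s _
  unfold Spec_return_sequence_from_input return_sequence_from_input return_sequence_from_input_alt
  have h := pvFold_flush (PySem.Str.upper s).toList [] []
  rw [(pvRunsP_spec _).1] at h
  rw [h]
  simp
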